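-- pv_equiv track=rewrite | github.com/victortch/tic-tac-toe | tic_tac_toe_victor18.py | change_move
-- ===== SOURCE A (Python) =====
-- import math
--
-- def move_row_position(move, n=3):
--     if ((move+1) % n) == 0:
--         current_row_position = n
--     else:
--         current_row_position = ((move+1) % n)
--     return current_row_position
--
-- def move_row(move, n=3):
--     return math.ceil((move+1)/n)
--
-- def right_space(move, n=3):
--     return (n - move_row_position(move, n))
--
-- def below_space(move, n=3):
--     return (n - move_row(move, n))
--
-- def move_from_coordinates(move_row, move_row_position, n=3):
--     move = ((move_row-1)*n + move_row_position)-1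
--     return move
--
-- def rotate_move_left(move, n=3):
--     new_move_row = 1 + right_space(move, n)
--     new_row_position = move_row(move, n)
--     new_position = move_from_coordinates(new_move_row, new_row_position, n)
--     return new_position
--
-- def rotate_move_right(move, n=3):
--     new_move_row = move_row_position(move, n)
--     new_row_position = 1 + below_space(move, n)
--     new_position = move_from_coordinates(new_move_row, new_row_position, n)
--     return new_position
--
-- def move_flip(move, n=3):
--     new_row_position = n - move_row_position(move, n) + 1
--     current_row = move_row(move, n)
--     new_position = move_from_coordinates(current_row, new_row_position, n)
--     return new_position
--
-- def change_move(move, rotations, direction = 'left', flip = False):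
--     new_move = move
--     rotations = rotations % 4
--     if flip:
--             new_move = move_flip(new_move)
--     if rotations > 0:
--         if direction == 'left':
--             for i in range(rotations):
--                 new_move = rotate_move_left(new_move)
--         else:
--             for i in range(rotations):
--                 new_move = rotate_move_right(new_move)
--     return new_move
-- ===== SOURCE B (Python) =====
-- def change_move(move, rotations, direction='left', flip=False):
--     # One divmod-based left quarter-turn primitive f(m) = (2 - m%3)*3 + m//3;
--     # the point reflection s(m) = 8 - m commutes with f and s∘f is a right
--     # quarter-turn, so r right turns = f^r followed by s when r is odd.
--     m = move
--     if flip: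
--         m = (m // 3) * 3 + 2 - m % 3
--     r = rotations % 4
--     for _ in range(r):
--         m = (2 - m % 3) * 3 + m // 3
--     if direction != 'left' and r % 2:
--         m = 8 - m
--     return m
-- ===== Notes on version B (the rewrite author's own statement) =====
-- stated objective: simpler
-- what changed: Replaces A's float-ceil coordinate helper zoo and the two per-direction rotation loops by a single divmod-based left quarter-turn formula, with the right direction obtained from the symmetry that the point reflection m -> 8-m composed with a left turn is a right turn (applied once after the loop when the turn count is odd).
import Mathlib
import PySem

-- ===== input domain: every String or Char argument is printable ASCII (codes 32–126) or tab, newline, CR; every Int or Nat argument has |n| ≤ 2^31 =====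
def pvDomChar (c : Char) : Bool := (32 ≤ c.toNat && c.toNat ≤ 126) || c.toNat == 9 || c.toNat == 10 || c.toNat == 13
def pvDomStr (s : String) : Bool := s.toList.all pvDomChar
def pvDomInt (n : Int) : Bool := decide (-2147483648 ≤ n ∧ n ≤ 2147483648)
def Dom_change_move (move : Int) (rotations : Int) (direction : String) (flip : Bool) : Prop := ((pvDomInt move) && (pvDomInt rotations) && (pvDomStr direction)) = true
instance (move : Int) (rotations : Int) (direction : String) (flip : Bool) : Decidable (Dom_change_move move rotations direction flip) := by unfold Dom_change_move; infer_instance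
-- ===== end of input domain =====

-- B replaces A's float/ceil coordinate helpers and the two per-direction rotation loops by a
-- single divmod-based left quarter-turn plus a point reflection for the right direction (simpler).

-- ===== PORT A =====
def move_row_position (move : Int) (n : Int) : Int :=
  if PySem.Int.mod (move + 1) n = 0 then n else PySem.Int.mod (move + 1) n

-- math.ceil((move+1)/n): exact ceiling division here (for |move| ≤ 2^31 and n = 3 the float
-- quotient never rounds across an integer), ported as -((-(move+1)) // n)
def move_row (move : Int) (n : Int) : Int :=
  -(PySem.Int.floordiv (-(move + 1)) n)

def right_space (move : Int) (n : Int) : Int := n - move_row_position move n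

def below_space (move : Int) (n : Int) : Int := n - move_row move n

def move_from_coordinates (mr : Int) (mrp : Int) (n : Int) : Int := ((mr - 1) * n + mrp) - 1

def rotate_move_left (move : Int) (n : Int) : Int :=
  move_from_coordinates (1 + right_space move n) (move_row move n) n

def rotate_move_right (move : Int) (n : Int) : Int :=
  move_from_coordinates (move_row_position move n) (1 + below_space move n) n

def move_flip (move : Int) (n : Int) : Int :=
  move_from_coordinates (move_row move n) (n - move_row_position move n + 1) n

def change_move (move : Int) (rotations : Int) (direction : String) (flip : Bool) : Int :=
  let new_move := move
  let rotations' := PySem.Int.mod rotations 4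
  let new_move := if flip then move_flip new_move 3 else new_move
  if rotations' > 0 then
    if direction = "left" then
      (PySem.List.pyRange 0 rotations' 1).foldl (fun m _ => rotate_move_left m 3) new_move
    else
      (PySem.List.pyRange 0 rotations' 1).foldl (fun m _ => rotate_move_right m 3) new_move
  else new_move

-- ===== PORT B =====
-- f(m) = (2 - m % 3) * 3 + m // 3 : one left quarter-turn
def cmStep (m : Int) : Int := (2 - PySem.Int.mod m 3) * 3 + PySem.Int.floordiv m 3

def change_move_alt (move : Int) (rotations : Int) (direction : String) (flip : Bool) : Int :=
  let m := move
  let m := if flip then PySem.Int.floordiv m 3 * 3 + 2 - PySem.Int.mod m 3 else m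
  let r := PySem.Int.mod rotations 4
  let m := (PySem.List.pyRange 0 r 1).foldl (fun m _ => cmStep m) m
  if direction ≠ "left" ∧ PySem.Int.mod r 2 ≠ 0 then 8 - m else m

-- ===== PRECONDITION & SPEC =====
def Spec_change_move (move : Int) (rotations : Int) (direction : String) (flip : Bool) (out : Int) : Prop := out = change_move_alt move rotations direction flip
instance (move : Int) (rotations : Int) (direction : String) (flip : Bool) (out : Int) : Decidable (Spec_change_move move rotations direction flip out) := by unfold Spec_change_move; infer_instance

-- ===== CLAIM (what is proved, stated in full; the proofs are below) =====
def Claim_equal_change_move : Prop := ∀ (move : Int) (rotations : Int) (direction : String) (flip : Bool), Dom_change_move move rotations direction flip → Spec_change_move move rotations direction flip (change_move move rotations direction flip)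

-- ===== LEMMAS AND PROOFS =====

lemma rotL_eq (m : Int) : rotate_move_left m 3 = cmStep m := by
  simp only [rotate_move_left, move_from_coordinates, right_space, move_row_position, move_row,
    cmStep, PySem.Int.mod_eq_emod_of_pos (a := m + 1) (by norm_num : (0:Int) < 3),
    PySem.Int.mod_eq_emod_of_pos (a := m) (by norm_num : (0:Int) < 3),
    PySem.Int.floordiv_eq_ediv_of_pos (a := -(m + 1)) (by norm_num : (0:Int) < 3),
    PySem.Int.floordiv_eq_ediv_of_pos (a := m) (by norm_num : (0:Int) < 3)]
  split_ifs with h <;> omega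

lemma rotR_eq (m : Int) : rotate_move_right m 3 = 8 - cmStep m := by
  simp only [rotate_move_right, move_from_coordinates, below_space, move_row_position, move_row,
    cmStep, PySem.Int.mod_eq_emod_of_pos (a := m + 1) (by norm_num : (0:Int) < 3),
    PySem.Int.mod_eq_emod_of_pos (a := m) (by norm_num : (0:Int) < 3),
    PySem.Int.floordiv_eq_ediv_of_pos (a := -(m + 1)) (by norm_num : (0:Int) < 3),
    PySem.Int.floordiv_eq_ediv_of_pos (a := m) (by norm_num : (0:Int) < 3)]
  split_ifs with h <;> omega

lemma flip_eq (m : Int) :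
    move_flip m 3 = PySem.Int.floordiv m 3 * 3 + 2 - PySem.Int.mod m 3 := by
  simp only [move_flip, move_from_coordinates, move_row_position, move_row,
    PySem.Int.mod_eq_emod_of_pos (a := m + 1) (by norm_num : (0:Int) < 3),
    PySem.Int.mod_eq_emod_of_pos (a := m) (by norm_num : (0:Int) < 3),
    PySem.Int.floordiv_eq_ediv_of_pos (a := -(m + 1)) (by norm_num : (0:Int) < 3),
    PySem.Int.floordiv_eq_ediv_of_pos (a := m) (by norm_num : (0:Int) < 3)]
  split_ifs with h <;> omega

-- the point reflection commutes with the left quarter-turn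
lemma step_refl (m : Int) : cmStep (8 - m) = 8 - cmStep m := by
  simp only [cmStep,
    PySem.Int.mod_eq_emod_of_pos (b := 3) (by norm_num : (0:Int) < 3),
    PySem.Int.floordiv_eq_ediv_of_pos (b := 3) (by norm_num : (0:Int) < 3)]
  omega

-- ===== VERDICT (by name: the statement is the Claim_ definition above) =====
theorem change_move_spec : Claim_equal_change_move := by
  intro move rotations direction flip _
  unfold Spec_change_move change_move change_move_alt
  have h0 : 0 ≤ PySem.Int.mod rotations 4 := PySem.Int.mod_nonneg rotations (by norm_num)
  have h4 : PySem.Int.mod rotations 4 < 4 := PySem.Int.mod_lt rotations (by norm_num)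
  set r := PySem.Int.mod rotations 4 with hr
  have hcase : r = 0 ∨ r = 1 ∨ r = 2 ∨ r = 3 := by omega
  by_cases hd : direction = "left" <;>
    rcases hcase with h | h | h | h <;>
    cases flip <;>
    simp [h, hd, flip_eq, List.foldl, rotL_eq, rotR_eq, step_refl,
      show PySem.List.pyRange 0 1 1 = [0] from by decide,
      show PySem.List.pyRange 0 2 1 = [0, 1] from by decide,
      show PySem.List.pyRange 0 3 1 = [0, 1, 2] from by decide]
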